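-- pv_equiv track=rewrite | github.com/MasterKali06/TopCoder | SRMs-Div2/149/3_Pricing-1000.py | maxSales
-- ===== SOURCE A (Python) =====
-- def maxSales(price):
--     p = sorted(price)
--     f = len(price)
--     res = 0
--     for i in range(f):
--         for j in range(f):
--             for k in range(f):
--                 for m in range(f):
--                     mp = 0
--                     for n in range(f):
--                         if p[n] >= p[m]:
--                             mp += p[m]
--                         elif p[n] >= p[k]:
--                             mp += p[k]
--                         elif p[n] >= p[j]:
--                             mp += p[j]
--                         elif p[n] >= p[i]:
--                             mp += p[i]
--                     res = max(res, mp)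
--     return res
-- ===== SOURCE B (Python) =====
-- def maxSales(price):
--     p = sorted(price)
--     f = len(p)
--     # cnt[t] = number of customers whose budget is at least p[t]
--     cnt = [sum(1 for x in p if x >= p[t]) for t in range(f)]
--     res = 0
--     for i in range(f):
--         for j in range(i, f):
--             for k in range(j, f):
--                 for m in range(k, f):
--                     rev = (p[m] * cnt[m] + p[k] * (cnt[k] - cnt[m])
--                            + p[j] * (cnt[j] - cnt[k]) + p[i] * (cnt[i] - cnt[j]))
--                     if rev > res:
--                         res = rev
--     return res
-- ===== Notes on version B (the rewrite author's own statement) =====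
-- stated objective: faster
-- what changed: B sorts once, precomputes for every price the number of customers who can afford it, and scans only the non-decreasing index quadruples, computing each candidate revenue by a closed count formula instead of A's inner pass over all customers for every one of the n^4 unordered quadruples.
import Mathlib
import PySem

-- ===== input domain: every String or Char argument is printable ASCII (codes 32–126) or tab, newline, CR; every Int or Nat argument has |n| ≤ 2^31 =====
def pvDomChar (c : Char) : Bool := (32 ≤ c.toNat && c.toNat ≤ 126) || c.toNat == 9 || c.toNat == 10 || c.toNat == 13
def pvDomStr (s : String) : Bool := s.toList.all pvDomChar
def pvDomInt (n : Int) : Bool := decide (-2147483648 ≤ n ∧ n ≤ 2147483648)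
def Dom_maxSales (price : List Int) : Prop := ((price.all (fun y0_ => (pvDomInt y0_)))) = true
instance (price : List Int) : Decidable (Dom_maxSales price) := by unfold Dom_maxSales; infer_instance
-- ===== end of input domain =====

-- B replaces A's scan of ALL price quadruples (with an inner pass over every customer for each
-- quadruple) by a scan of only the sorted index quadruples, pricing each tier from a precomputed
-- count of customers who can afford it.

-- ===== PORT A =====
def maxSales (price : List Int) : Int :=
  let p := PySem.List.sorted price (fun x => x) false
  let f : Int := (price.length : Int)
  (PySem.List.pyRange 0 f 1).foldl (fun res i =>
    (PySem.List.pyRange 0 f 1).foldl (fun res j =>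
      (PySem.List.pyRange 0 f 1).foldl (fun res k =>
        (PySem.List.pyRange 0 f 1).foldl (fun res m =>
          let mp := (PySem.List.pyRange 0 f 1).foldl (fun mp n =>
            if PySem.List.pyGetD p n 0 ≥ PySem.List.pyGetD p m 0 then
              mp + PySem.List.pyGetD p m 0
            else if PySem.List.pyGetD p n 0 ≥ PySem.List.pyGetD p k 0 then
              mp + PySem.List.pyGetD p k 0
            else if PySem.List.pyGetD p n 0 ≥ PySem.List.pyGetD p j 0 then
              mp + PySem.List.pyGetD p j 0
            else if PySem.List.pyGetD p n 0 ≥ PySem.List.pyGetD p i 0 then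
              mp + PySem.List.pyGetD p i 0
            else mp) 0
          max res mp) res) res) res) 0

-- ===== PORT B =====
def maxSales_alt (price : List Int) : Int :=
  let p := PySem.List.sorted price (fun x => x) false
  let f : Int := (p.length : Int)
  let cnt : List Int := (PySem.List.pyRange 0 f 1).map (fun t =>
    p.foldl (fun s x => if x ≥ PySem.List.pyGetD p t 0 then s + 1 else s) 0)
  (PySem.List.pyRange 0 f 1).foldl (fun res i =>
    (PySem.List.pyRange i f 1).foldl (fun res j =>
      (PySem.List.pyRange j f 1).foldl (fun res k =>
        (PySem.List.pyRange k f 1).foldl (fun res m =>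
          let rev := PySem.List.pyGetD p m 0 * PySem.List.pyGetD cnt m 0
            + PySem.List.pyGetD p k 0 * (PySem.List.pyGetD cnt k 0 - PySem.List.pyGetD cnt m 0)
            + PySem.List.pyGetD p j 0 * (PySem.List.pyGetD cnt j 0 - PySem.List.pyGetD cnt k 0)
            + PySem.List.pyGetD p i 0 * (PySem.List.pyGetD cnt i 0 - PySem.List.pyGetD cnt j 0)
          if rev > res then rev else res) res) res) res) 0

-- ===== PRECONDITION & SPEC =====
def Spec_maxSales (price : List Int) (out : Int) : Prop := out = maxSales_alt price
instance (price : List Int) (out : Int) : Decidable (Spec_maxSales price out) := by unfold Spec_maxSales; infer_instance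

-- ===== CLAIM (what is proved, stated in full; the proofs are below) =====
def Claim_equal_maxSales : Prop := ∀ (price : List Int), Dom_maxSales price → Spec_maxSales price (maxSales price)

-- ===== LEMMAS AND PROOFS =====

-- the tier a customer with budget x pays under A's elif-chain with tiers a b c d (d checked first)
def chain4 (a b c d x : Int) : Int :=
  if x ≥ d then d else if x ≥ c then c else if x ≥ b then b else if x ≥ a then a else 0

-- number of elements of L that are ≥ v (as an Int)
def cntGE (L : List Int) (v : Int) : Int := (L.countP (fun x => decide (x ≥ v)) : Int)

-- revenue of the quadruple (i,j,k,m) as A computes it (inner customer scan)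
def revF (p : List Int) (i j k m : Int) : Int :=
  (p.map (chain4 (PySem.List.pyGetD p i 0) (PySem.List.pyGetD p j 0)
    (PySem.List.pyGetD p k 0) (PySem.List.pyGetD p m 0))).sum

-- revenue of the quadruple (i,j,k,m) as B computes it, with the counts named
def revG (p : List Int) (i j k m : Int) : Int :=
  PySem.List.pyGetD p m 0 * cntGE p (PySem.List.pyGetD p m 0)
    + PySem.List.pyGetD p k 0 * (cntGE p (PySem.List.pyGetD p k 0) - cntGE p (PySem.List.pyGetD p m 0))
    + PySem.List.pyGetD p j 0 * (cntGE p (PySem.List.pyGetD p j 0) - cntGE p (PySem.List.pyGetD p k 0))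
    + PySem.List.pyGetD p i 0 * (cntGE p (PySem.List.pyGetD p i 0) - cntGE p (PySem.List.pyGetD p j 0))

-- revenue of the quadruple (i,j,k,m) exactly as B's loop body computes it (cnt-list lookups)
def rawRev (p : List Int) (i j k m : Int) : Int :=
  let cnt : List Int := (PySem.List.pyRange 0 (p.length : Int) 1).map (fun t =>
    p.foldl (fun s x => if x ≥ PySem.List.pyGetD p t 0 then s + 1 else s) 0)
  PySem.List.pyGetD p m 0 * PySem.List.pyGetD cnt m 0
    + PySem.List.pyGetD p k 0 * (PySem.List.pyGetD cnt k 0 - PySem.List.pyGetD cnt m 0)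
    + PySem.List.pyGetD p j 0 * (PySem.List.pyGetD cnt j 0 - PySem.List.pyGetD cnt k 0)
    + PySem.List.pyGetD p i 0 * (PySem.List.pyGetD cnt i 0 - PySem.List.pyGetD cnt j 0)

def bigA (p : List Int) : List Int :=
  (PySem.List.pyRange 0 (p.length : Int) 1).flatMap (fun i =>
    (PySem.List.pyRange 0 (p.length : Int) 1).flatMap (fun j =>
      (PySem.List.pyRange 0 (p.length : Int) 1).flatMap (fun k =>
        (PySem.List.pyRange 0 (p.length : Int) 1).map (fun m => revF p i j k m))))

def bigB (p : List Int) : List Int :=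
  (PySem.List.pyRange 0 (p.length : Int) 1).flatMap (fun i =>
    (PySem.List.pyRange i (p.length : Int) 1).flatMap (fun j =>
      (PySem.List.pyRange j (p.length : Int) 1).flatMap (fun k =>
        (PySem.List.pyRange k (p.length : Int) 1).map (fun m => rawRev p i j k m))))

theorem if_gt_eq_max (res rev : Int) : (if rev > res then rev else res) = max res rev := by
  rw [max_def]; split_ifs <;> omega

theorem foldl_max_map {α : Type} (l : List α) (g : α → Int) (r : Int) :
    l.foldl (fun res x => max res (g x)) r = (l.map g).foldl max r := by
  rw [List.foldl_map]

theorem foldl_foldl_max {α : Type} (l : List α) (g : α → List Int) (r : Int) :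
    l.foldl (fun res x => (g x).foldl max res) r = (l.flatMap g).foldl max r := by
  induction l generalizing r with
  | nil => simp
  | cons x t ih => simp [List.flatMap_cons, List.foldl_append, ih]

theorem innerA (p : List Int) (i j k m : Int) :
    (PySem.List.pyRange 0 (p.length : Int) 1).foldl (fun mp n =>
      if PySem.List.pyGetD p n 0 ≥ PySem.List.pyGetD p m 0 then mp + PySem.List.pyGetD p m 0
      else if PySem.List.pyGetD p n 0 ≥ PySem.List.pyGetD p k 0 then mp + PySem.List.pyGetD p k 0
      else if PySem.List.pyGetD p n 0 ≥ PySem.List.pyGetD p j 0 then mp + PySem.List.pyGetD p j 0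
      else if PySem.List.pyGetD p n 0 ≥ PySem.List.pyGetD p i 0 then mp + PySem.List.pyGetD p i 0
      else mp) 0 = revF p i j k m := by
  rw [PySem.List.foldl_congr_mem (PySem.List.pyRange 0 (p.length : Int) 1)
      (fun mp n =>
        if PySem.List.pyGetD p n 0 ≥ PySem.List.pyGetD p m 0 then mp + PySem.List.pyGetD p m 0
        else if PySem.List.pyGetD p n 0 ≥ PySem.List.pyGetD p k 0 then mp + PySem.List.pyGetD p k 0
        else if PySem.List.pyGetD p n 0 ≥ PySem.List.pyGetD p j 0 then mp + PySem.List.pyGetD p j 0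
        else if PySem.List.pyGetD p n 0 ≥ PySem.List.pyGetD p i 0 then mp + PySem.List.pyGetD p i 0
        else mp)
      (fun mp n => mp + chain4 (PySem.List.pyGetD p i 0) (PySem.List.pyGetD p j 0)
        (PySem.List.pyGetD p k 0) (PySem.List.pyGetD p m 0) (PySem.List.pyGetD p n 0))
      0 (by intro acc n _; simp only [chain4]; split_ifs <;> omega)]
  rw [PySem.List.foldl_pyRange_zero_pyGetD' p 0
      (fun mp x => mp + chain4 (PySem.List.pyGetD p i 0) (PySem.List.pyGetD p j 0)
        (PySem.List.pyGetD p k 0) (PySem.List.pyGetD p m 0) x) 0]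
  rw [PySem.List.foldl_add]
  simp [revF]

theorem maxSales_eq_bigA (price : List Int) :
    maxSales price = (bigA (PySem.List.sorted price (fun x => x) false)).foldl max 0 := by
  have hf : (price.length : Int) = ((PySem.List.sorted price (fun x => x) false).length : Int) := by
    rw [PySem.List.length_sorted]
  simp only [maxSales, hf, innerA, foldl_max_map, foldl_foldl_max, bigA]

theorem maxSales_alt_eq_bigB (price : List Int) :
    maxSales_alt price = (bigB (PySem.List.sorted price (fun x => x) false)).foldl max 0 := by
  simp only [maxSales_alt, if_gt_eq_max, foldl_max_map, foldl_foldl_max, bigB, rawRev]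

theorem sumChain (L : List Int) (a b c d : Int) (hab : a ≤ b) (hbc : b ≤ c) (hcd : c ≤ d) :
    (L.map (chain4 a b c d)).sum =
      d * cntGE L d + c * (cntGE L c - cntGE L d) + b * (cntGE L b - cntGE L c)
        + a * (cntGE L a - cntGE L b) := by
  induction L with
  | nil => simp [cntGE]
  | cons x tl ih =>
    simp only [List.map_cons, List.sum_cons, cntGE, List.countP_cons, decide_eq_true_eq] at ih ⊢
    rw [ih]
    unfold chain4
    simp only [ge_iff_le]
    split_ifs <;> push_cast <;> linarith

theorem chain4_le (x a b c d a' b' c' d' : Int)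
    (h1 : a' ≤ b') (h2 : b' ≤ c') (h3 : c' ≤ d')
    (ha : a = a' ∨ a = b' ∨ a = c' ∨ a = d') (hb : b = a' ∨ b = b' ∨ b = c' ∨ b = d')
    (hc : c = a' ∨ c = b' ∨ c = c' ∨ c = d') (hd : d = a' ∨ d = b' ∨ d = c' ∨ d = d')
    (hlo : a' = a ∨ a' = b ∨ a' = c ∨ a' = d) :
    chain4 a b c d x ≤ chain4 a' b' c' d' x := by
  unfold chain4; split_ifs <;> omega

theorem sort4 (i j k m : Int) : ∃ i' j' k' m' : Int,
    i' ≤ j' ∧ j' ≤ k' ∧ k' ≤ m' ∧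
    (∀ x : Int, x ∈ ([i, j, k, m] : List Int) ↔ x ∈ ([i', j', k', m'] : List Int)) := by
  have hperm := PySem.List.sorted_perm (xs := [i,j,k,m]) (key := fun x => x) (rev := false)
  have hpair := PySem.List.sorted_pairwise (xs := [i,j,k,m]) (key := fun x => x)
  have hlen : (PySem.List.sorted [i,j,k,m] (fun x => x) false).length = 4 := by
    rw [PySem.List.length_sorted]; rfl
  rcases h : PySem.List.sorted [i,j,k,m] (fun x => x) false with _|⟨a,_|⟨b,_|⟨c,_|⟨d,rest⟩⟩⟩⟩ <;>
      rw [h] at hlen <;> simp only [List.length_cons, List.length_nil] at hlen <;> try omega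
  have hrest : rest = [] := by cases rest with | nil => rfl | cons y t => simp at hlen
  subst hrest
  rw [h] at hperm hpair
  simp only [List.pairwise_cons, List.mem_cons, List.not_mem_nil] at hpair
  refine ⟨a, b, c, d, ?_, ?_, ?_, fun x => (hperm.mem_iff).symm⟩
  · exact hpair.1 b (by simp)
  · exact hpair.2.1 c (by simp)
  · exact hpair.2.2.1 d (by simp)

theorem pg_mono (p : List Int) (hs : List.Pairwise (· ≤ ·) p) (i j : Int)
    (h0 : 0 ≤ i) (hij : i ≤ j) (hj : j < (p.length : Int)) :
    PySem.List.pyGetD p i 0 ≤ PySem.List.pyGetD p j 0 := by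
  rw [PySem.List.pyGetD_eq_getElem p (i := i) 0 (by omega) (by omega),
      PySem.List.pyGetD_eq_getElem p (i := j) 0 (by omega) (by omega)]
  rcases eq_or_lt_of_le hij with rfl | hlt
  · exact le_refl _
  · exact List.pairwise_iff_getElem.mp hs _ _ (by omega) (by omega) (by omega)

theorem rawRev_eq_revG (p : List Int) (i j k m : Int)
    (hi : 0 ≤ i) (hij : i ≤ j) (hjk : j ≤ k) (hkm : k ≤ m) (hm : m < (p.length : Int)) :
    rawRev p i j k m = revG p i j k m := by
  simp only [rawRev, revG]
  rw [PySem.List.pyGetD_map_pyRange_of_nonneg _ _ i _ (by omega) (by omega),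
      PySem.List.pyGetD_map_pyRange_of_nonneg _ _ j _ (by omega) (by omega),
      PySem.List.pyGetD_map_pyRange_of_nonneg _ _ k _ (by omega) (by omega),
      PySem.List.pyGetD_map_pyRange_of_nonneg _ _ m _ (by omega) (by omega),
      PySem.List.foldl_ite_add_one (fun x => x ≥ PySem.List.pyGetD p i 0) p 0,
      PySem.List.foldl_ite_add_one (fun x => x ≥ PySem.List.pyGetD p j 0) p 0,
      PySem.List.foldl_ite_add_one (fun x => x ≥ PySem.List.pyGetD p k 0) p 0,
      PySem.List.foldl_ite_add_one (fun x => x ≥ PySem.List.pyGetD p m 0) p 0]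
  simp only [cntGE, zero_add]

theorem revF_eq_revG (p : List Int) (hs : List.Pairwise (· ≤ ·) p) (i j k m : Int)
    (hi : 0 ≤ i) (hij : i ≤ j) (hjk : j ≤ k) (hkm : k ≤ m) (hm : m < (p.length : Int)) :
    revF p i j k m = revG p i j k m := by
  unfold revF revG
  rw [sumChain p _ _ _ _ (pg_mono p hs i j hi hij (by omega))
      (pg_mono p hs j k (by omega) hjk (by omega)) (pg_mono p hs k m (by omega) hkm hm)]

theorem maxSales_eq_maxSales_alt (price : List Int) : maxSales price = maxSales_alt price := by
  rw [maxSales_eq_bigA, maxSales_alt_eq_bigB]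
  have hs : List.Pairwise (· ≤ ·) (PySem.List.sorted price (fun x => x) false) := by
    simpa using PySem.List.sorted_pairwise price (fun x => x)
  set p := PySem.List.sorted price (fun x => x) false with hp
  apply le_antisymm
  · rcases PySem.List.foldl_max_mem (bigA p) 0 with h | h
    · rw [h]; exact (PySem.List.le_foldl_max (bigB p) 0).1
    · revert h
      generalize List.foldl max 0 (bigA p) = v
      intro h
      simp only [bigA, List.mem_flatMap, List.mem_map, PySem.List.mem_pyRange_one] at h
      obtain ⟨i, ⟨hi0, hif⟩, j, ⟨hj0, hjf⟩, k, ⟨hk0, hkf⟩, m, ⟨hm0, hmf⟩, rfl⟩ := h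
      obtain ⟨i', j', k', m', h12, h23, h34, hmem⟩ := sort4 i j k m
      have hbi : ∀ x : Int, x ∈ ([i', j', k', m'] : List Int) → 0 ≤ x ∧ x < (p.length : Int) := by
        intro x hx
        have := (hmem x).mpr hx
        simp only [List.mem_cons, List.not_mem_nil, or_false] at this
        rcases this with rfl | rfl | rfl | rfl <;> constructor <;> omega
      have hi' := hbi i' (by simp)
      have hj' := hbi j' (by simp)
      have hk' := hbi k' (by simp)
      have hm' := hbi m' (by simp)
      have hstep : revF p i j k m ≤ revF p i' j' k' m' := by
        unfold revF
        apply List.sum_le_sum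
        intro x hx
        apply chain4_le
        · exact pg_mono p hs i' j' hi'.1 h12 hj'.2
        · exact pg_mono p hs j' k' hj'.1 h23 hk'.2
        · exact pg_mono p hs k' m' hk'.1 h34 hm'.2
        · have : i ∈ ([i', j', k', m'] : List Int) := (hmem i).mp (by simp)
          simp only [List.mem_cons, List.not_mem_nil, or_false] at this
          rcases this with rfl | rfl | rfl | rfl <;> simp
        · have : j ∈ ([i', j', k', m'] : List Int) := (hmem j).mp (by simp)
          simp only [List.mem_cons, List.not_mem_nil, or_false] at this
          rcases this with rfl | rfl | rfl | rfl <;> simp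
        · have : k ∈ ([i', j', k', m'] : List Int) := (hmem k).mp (by simp)
          simp only [List.mem_cons, List.not_mem_nil, or_false] at this
          rcases this with rfl | rfl | rfl | rfl <;> simp
        · have : m ∈ ([i', j', k', m'] : List Int) := (hmem m).mp (by simp)
          simp only [List.mem_cons, List.not_mem_nil, or_false] at this
          rcases this with rfl | rfl | rfl | rfl <;> simp
        · have : i' ∈ ([i, j, k, m] : List Int) := (hmem i').mpr (by simp)
          simp only [List.mem_cons, List.not_mem_nil, or_false] at this
          rcases this with rfl | rfl | rfl | rfl <;> simp
      have hmemB : rawRev p i' j' k' m' ∈ bigB p := by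
        simp only [bigB, List.mem_flatMap, List.mem_map, PySem.List.mem_pyRange_one]
        exact ⟨i', ⟨hi'.1, by omega⟩, j', ⟨h12, by omega⟩, k', ⟨h23, by omega⟩, m',
          ⟨h34, hm'.2⟩, rfl⟩
      calc revF p i j k m ≤ revF p i' j' k' m' := hstep
        _ = revG p i' j' k' m' := revF_eq_revG p hs i' j' k' m' hi'.1 h12 h23 h34 hm'.2
        _ = rawRev p i' j' k' m' := (rawRev_eq_revG p i' j' k' m' hi'.1 h12 h23 h34 hm'.2).symm
        _ ≤ (bigB p).foldl max 0 := (PySem.List.le_foldl_max (bigB p) 0).2 _ hmemB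
  · rcases PySem.List.foldl_max_mem (bigB p) 0 with h | h
    · rw [h]; exact (PySem.List.le_foldl_max (bigA p) 0).1
    · revert h
      generalize List.foldl max 0 (bigB p) = v
      intro h
      simp only [bigB, List.mem_flatMap, List.mem_map, PySem.List.mem_pyRange_one] at h
      obtain ⟨i, ⟨hi0, hif⟩, j, ⟨hij, hjf⟩, k, ⟨hjk, hkf⟩, m, ⟨hkm, hmf⟩, rfl⟩ := h
      have hmemA : revF p i j k m ∈ bigA p := by
        simp only [bigA, List.mem_flatMap, List.mem_map, PySem.List.mem_pyRange_one]
        exact ⟨i, ⟨hi0, by omega⟩, j, ⟨by omega, by omega⟩, k, ⟨by omega, by omega⟩, m,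
          ⟨by omega, hmf⟩, rfl⟩
      calc rawRev p i j k m = revG p i j k m := rawRev_eq_revG p i j k m hi0 hij hjk hkm hmf
        _ = revF p i j k m := (revF_eq_revG p hs i j k m hi0 hij hjk hkm hmf).symm
        _ ≤ (bigA p).foldl max 0 := (PySem.List.le_foldl_max (bigA p) 0).2 _ hmemA

-- ===== VERDICT (by name: the statement is the Claim_ definition above) =====
theorem maxSales_spec : Claim_equal_maxSales := by
  intro price _
  unfold Spec_maxSales
  exact maxSales_eq_maxSales_alt price
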